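-- pv_equiv track=rewrite | github.com/mohammedsuhail364/LeetCode | 2478-longest-nice-subarray/2478-longest-nice-subarray.py | longestNiceSubarray
-- ===== SOURCE A (Python) =====
-- from typing import List
--
-- def longestNiceSubarray(nums: List[int]) -> int:
--     def check(li):
--         for i in range(len(li)):
--             for j in range(i+1,len(li)):
--                 if (li[i]&li[j]) !=0:
--                     return False
--         return True
--     res=1
--     for i in range(len(nums)):
--         for j in range(i+1,len(nums)+1):
--             k=nums[i:j]
--             if check(k):
--                 res=max(res,len(k))
--             else:
--                 break
--     return res
-- ===== SOURCE B (Python) =====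
-- from typing import List
--
-- def longestNiceSubarray(nums: List[int]) -> int:
--     # Per start, extend with a running OR bitmask; a new element fits iff it is
--     # disjoint from the mask, so A's quadratic pairwise check per slice disappears.
--     res = 1
--     n = len(nums)
--     for i in range(n):
--         cur = 0
--         j = i
--         while j < n and cur & nums[j] == 0:
--             cur |= nums[j]
--             j += 1
--         res = max(res, j - i)
--     return res
-- ===== Notes on version B (the rewrite author's own statement) =====
-- stated objective: faster
-- what changed: Replaced the brute-force scan over all (start,end) slices with a quadratic pairwise-AND check per slice by a per-start extension that maintains a running OR bitmask, so deciding whether the next element keeps the window nice is a single AND against the mask.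
import Mathlib
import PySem

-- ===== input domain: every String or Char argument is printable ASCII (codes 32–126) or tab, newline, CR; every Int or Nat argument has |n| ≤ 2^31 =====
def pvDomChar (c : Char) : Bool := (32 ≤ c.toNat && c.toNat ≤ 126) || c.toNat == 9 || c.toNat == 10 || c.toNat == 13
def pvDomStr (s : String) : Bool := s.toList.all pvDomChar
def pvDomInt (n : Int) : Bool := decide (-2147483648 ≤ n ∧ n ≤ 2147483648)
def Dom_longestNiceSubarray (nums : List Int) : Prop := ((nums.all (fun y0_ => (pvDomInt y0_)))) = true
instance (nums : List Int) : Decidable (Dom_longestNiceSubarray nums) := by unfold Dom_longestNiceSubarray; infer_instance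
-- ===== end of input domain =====

-- B replaces A's all-slices scan with a pairwise check by a per-start running OR bitmask (faster; asymptotic).

-- ===== PORT A =====
-- inner j-loop of check: 'return False' on the first intersecting pair
def pvCheckJ (li : List Int) (i : Int) : List Int → Bool
  | [] => true
  | j :: js =>
    if PySem.Int.band (PySem.List.pyGetD li i 0) (PySem.List.pyGetD li j 0) ≠ 0 then false
    else pvCheckJ li i js

-- outer i-loop of check
def pvCheckI (li : List Int) : List Int → Bool
  | [] => true
  | i :: is => if pvCheckJ li i (PySem.List.pyRange (i + 1) (li.length : Int)) then pvCheckI li is else false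

def pvCheck (li : List Int) : Bool := pvCheckI li (PySem.List.pyRange 0 (li.length : Int))

-- inner j-loop of A: k = nums[i:j]; update res while check(k), break otherwise
def pvInnerA (nums : List Int) (i : Int) : Int → List Int → Int
  | res, [] => res
  | res, j :: js =>
    let k := PySem.List.slice nums (some i) (some j)
    if pvCheck k then pvInnerA nums i (max res (k.length : Int)) js else res

-- outer i-loop of A
def pvOuterA (nums : List Int) : Int → List Int → Int
  | res, [] => res
  | res, i :: is =>
    pvOuterA nums (pvInnerA nums i res (PySem.List.pyRange (i + 1) ((nums.length : Int) + 1))) is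

def longestNiceSubarray (nums : List Int) : Int :=
  pvOuterA nums 1 (PySem.List.pyRange 0 (nums.length : Int))

-- ===== PORT B =====
-- inner while-loop of B: extend j while nums[j] is disjoint from the running OR mask `cur`;
-- the Nat argument is fuel making the while loop structurally total (n - j ≤ fuel throughout)
def pvWhileB (nums : List Int) : Nat → Int → Int → Int
  | 0, _, j => j
  | d + 1, cur, j =>
    if j < (nums.length : Int) ∧ PySem.Int.band cur (PySem.List.pyGetD nums j 0) = 0 then
      pvWhileB nums d (PySem.Int.bor cur (PySem.List.pyGetD nums j 0)) (j + 1)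
    else j

-- outer i-loop of B
def pvOuterB (nums : List Int) : Int → List Int → Int
  | res, [] => res
  | res, i :: is =>
    pvOuterB nums (max res (pvWhileB nums nums.length 0 i - i)) is

def longestNiceSubarray_alt (nums : List Int) : Int :=
  pvOuterB nums 1 (PySem.List.pyRange 0 (nums.length : Int))

-- ===== PRECONDITION & SPEC =====
def Spec_longestNiceSubarray (nums : List Int) (out : Int) : Prop := out = longestNiceSubarray_alt nums
instance (nums : List Int) (out : Int) : Decidable (Spec_longestNiceSubarray nums out) := by unfold Spec_longestNiceSubarray; infer_instance

-- ===== CLAIM (what is proved, stated in full; the proofs are below) =====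
def Claim_equal_longestNiceSubarray : Prop := ∀ (nums : List Int), Dom_longestNiceSubarray nums → Spec_longestNiceSubarray nums (longestNiceSubarray nums)

-- ===== LEMMAS AND PROOFS =====

-- proof-side abstraction of B's while loop: length of the OR-compatible prefix
def pvGoB : Int → Int → List Int → Int
  | _, len, [] => len
  | cur, len, x :: xs =>
    if PySem.Int.band cur x ≠ 0 then len else pvGoB (PySem.Int.bor cur x) (len + 1) xs

-- a &&& 0-on-the-left is 0
theorem pvBand_zero_left (x : Int) : PySem.Int.band 0 x = 0 := by
  rw [PySem.Int.band_comm]; exact PySem.Int.band_zero x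

-- Subtracting a submask is bitwise: m - (m &&& y) = m ^^^ (m &&& y)
theorem pvSubAndEq : ∀ m y : Nat, m - (m &&& y) = m ^^^ (m &&& y) := by
  intro m
  induction m using Nat.strongRecOn with
  | ind m IH =>
    intro y
    rcases Nat.eq_zero_or_pos m with hm | hm
    · simp [hm]
    · have h2 : m / 2 < m := Nat.div_lt_self hm (by omega)
      have hIH := IH (m / 2) h2 (y / 2)
      have hA : (m &&& y) / 2 = m / 2 &&& y / 2 := Nat.and_div_two
      have hX : (m ^^^ (m &&& y)) / 2 = m / 2 ^^^ (m &&& y) / 2 := Nat.xor_div_two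
      have hAm : ((m &&& y) % 2 = 1) ↔ (m % 2 = 1 ∧ y % 2 = 1) := Nat.and_mod_two_eq_one
      have hXm : ((m ^^^ (m &&& y)) % 2 = 1) ↔ ¬ ((m % 2 = 1) ↔ ((m &&& y) % 2 = 1)) :=
        Nat.xor_mod_two_eq_one
      rw [← hA] at hIH
      have hle : m / 2 &&& y / 2 ≤ m / 2 := Nat.and_le_left
      have e1 : m = 2 * (m / 2) + m % 2 := by omega
      have e2 : (m &&& y) = 2 * ((m &&& y) / 2) + (m &&& y) % 2 := by omega
      have e3 : (m ^^^ (m &&& y)) = 2 * ((m ^^^ (m &&& y)) / 2) + (m ^^^ (m &&& y)) % 2 := by omega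
      omega

theorem pvTestBit_sub_and (m y k : Nat) :
    (m - (m &&& y)).testBit k = (m.testBit k && !(y.testBit k)) := by
  rw [pvSubAndEq, Nat.testBit_xor, Nat.testBit_and]
  cases m.testBit k <;> cases y.testBit k <;> rfl

-- two's-complement bit reading of an Int
def pvTb (x : Int) (k : Nat) : Bool :=
  if 0 ≤ x then x.toNat.testBit k else !((-x - 1).toNat.testBit k)

theorem pvTb_band (a b : Int) (k : Nat) :
    pvTb (PySem.Int.band a b) k = (pvTb a k && pvTb b k) := by
  by_cases ha : 0 ≤ a <;> by_cases hb : 0 ≤ b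
  · simp [PySem.Int.band, pvTb, ha, hb, Nat.testBit_and]
  · simp [PySem.Int.band, pvTb, ha, hb, pvTestBit_sub_and]
  · simp [PySem.Int.band, pvTb, ha, hb, pvTestBit_sub_and, Bool.and_comm]
  · simp [PySem.Int.band, pvTb, ha, hb, Nat.testBit_or]
    intro _ _; omega

theorem pvTb_bor (a b : Int) (k : Nat) :
    pvTb (PySem.Int.bor a b) k = (pvTb a k || pvTb b k) := by
  by_cases ha : 0 ≤ a <;> by_cases hb : 0 ≤ b
  · simp [PySem.Int.bor, pvTb, ha, hb, Nat.testBit_or]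
  · simp [PySem.Int.bor, pvTb, ha, hb, pvTestBit_sub_and, Bool.or_comm]
    intro _; omega
  · simp [PySem.Int.bor, pvTb, ha, hb, pvTestBit_sub_and]
    intro _; omega
  · simp [PySem.Int.bor, pvTb, ha, hb, Nat.testBit_and]
    intro _; omega

theorem pvTb_zero_iff (x : Int) : x = 0 ↔ ∀ k, pvTb x k = false := by
  constructor
  · rintro rfl k; simp [pvTb]
  · intro h
    by_cases hx : 0 ≤ x
    · have : x.toNat = 0 := by
        apply Nat.eq_of_testBit_eq
        intro i
        have := h i
        simpa [pvTb, hx] using this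
      omega
    · exfalso
      have hk := h ((-x).toNat - 1)
      simp [pvTb, hx] at hk
      have hfalse : ((-x).toNat - 1).testBit ((-x).toNat - 1) = false :=
        Nat.testBit_lt_two_pow Nat.lt_two_pow_self
      rw [hk] at hfalse
      simp at hfalse

-- the sliding-mask principle: the new element intersects the OR mask iff it intersects some member
theorem pvBand_bor_zero_iff (a b c : Int) :
    PySem.Int.band (PySem.Int.bor a b) c = 0 ↔
      (PySem.Int.band a c = 0 ∧ PySem.Int.band b c = 0) := by
  rw [pvTb_zero_iff, pvTb_zero_iff (PySem.Int.band a c), pvTb_zero_iff (PySem.Int.band b c)]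
  rw [← forall_and]
  apply forall_congr'
  intro k
  rw [pvTb_band, pvTb_band, pvTb_band, pvTb_bor]
  cases pvTb a k <;> cases pvTb b k <;> cases pvTb c k <;> simp

-- ---- characterization of A's check ----
theorem pvCheckJ_eq (li : List Int) (i : Int) (js : List Int) :
    pvCheckJ li i js =
      js.all fun j => decide (PySem.Int.band (PySem.List.pyGetD li i 0) (PySem.List.pyGetD li j 0) = 0) := by
  induction js with
  | nil => rfl
  | cons j js ih =>
    rw [pvCheckJ, List.all_cons, ih]
    by_cases h : PySem.Int.band (PySem.List.pyGetD li i 0) (PySem.List.pyGetD li j 0) = 0 <;> simp [h]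

theorem pvCheckI_eq (li : List Int) (is : List Int) :
    pvCheckI li is = is.all fun i => pvCheckJ li i (PySem.List.pyRange (i + 1) (li.length : Int)) := by
  induction is with
  | nil => rfl
  | cons i is ih =>
    rw [pvCheckI, List.all_cons, ih]
    by_cases h : pvCheckJ li i (PySem.List.pyRange (i + 1) (li.length : Int)) <;> simp [h]

theorem pvCheck_iff (li : List Int) :
    pvCheck li = true ↔ li.Pairwise (fun x y => PySem.Int.band x y = 0) := by
  rw [pvCheck, pvCheckI_eq, List.all_eq_true, List.pairwise_iff_getElem]
  constructor
  · intro h p q hp hq hpq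
    have h1 := h (p : Int) (by rw [PySem.List.mem_pyRange_one]; constructor <;> omega)
    rw [pvCheckJ_eq, List.all_eq_true] at h1
    have h2 := h1 (q : Int) (by rw [PySem.List.mem_pyRange_one]; constructor <;> omega)
    rw [decide_eq_true_iff] at h2
    rw [PySem.List.pyGetD_natCast, PySem.List.pyGetD_natCast] at h2
    rwa [List.getD_eq_getElem li 0 hp, List.getD_eq_getElem li 0 hq] at h2
  · intro h i hi
    rw [PySem.List.mem_pyRange_one] at hi
    rw [pvCheckJ_eq, List.all_eq_true]
    intro j hj
    rw [PySem.List.mem_pyRange_one] at hj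
    rw [decide_eq_true_iff]
    have hi' : i = ((i.toNat : Nat) : Int) := by omega
    have hj' : j = ((j.toNat : Nat) : Int) := by omega
    rw [hi', hj', PySem.List.pyGetD_natCast, PySem.List.pyGetD_natCast]
    have hip : i.toNat < li.length := by omega
    have hjp : j.toNat < li.length := by omega
    rw [List.getD_eq_getElem li 0 hip, List.getD_eq_getElem li 0 hjp]
    exact h i.toNat j.toNat hip hjp (by omega)

-- ---- B's inner loop ----
theorem pvGoB_shift (l : List Int) : ∀ cur len, pvGoB cur len l = len + pvGoB cur 0 l := by
  induction l with
  | nil => intro cur len; simp [pvGoB]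
  | cons x xs ih =>
    intro cur len
    rw [pvGoB, pvGoB]
    by_cases h : PySem.Int.band cur x = 0
    · simp only [h, ne_eq, not_true_eq_false, if_false]
      rw [ih _ (len + 1), ih _ (0 + 1)]
      ring
    · simp [h]

theorem pvGoB_nonneg (l : List Int) : ∀ cur len, len ≤ pvGoB cur len l := by
  induction l with
  | nil => intro cur len; simp [pvGoB]
  | cons x xs ih =>
    intro cur len
    rw [pvGoB]
    by_cases h : PySem.Int.band cur x = 0
    · simp only [h, ne_eq, not_true_eq_false, if_false]
      have := ih (PySem.Int.bor cur x) (len + 1)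
      omega
    · simp [h]

-- ---- the main loop invariant ----
theorem pvInnerA_eq (nums : List Int) :
    ∀ (d i j : Nat) (res cur : Int),
      nums.length ≤ j + d → i ≤ j → j ≤ nums.length →
      ((nums.drop i).take (j - i)).Pairwise (fun x y => PySem.Int.band x y = 0) →
      (∀ x : Int, PySem.Int.band cur x = 0 ↔ ∀ y ∈ (nums.drop i).take (j - i), PySem.Int.band y x = 0) →
      ((j : Int) - (i : Int)) ≤ res →
      pvInnerA nums (i : Int) res (PySem.List.pyRange ((j : Int) + 1) ((nums.length : Int) + 1))
        = max res (((j : Int) - (i : Int)) + pvGoB cur 0 (nums.drop j)) := by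
  intro d
  induction d with
  | zero =>
    intro i j res cur hd hij hjn _hp _hcur hres
    have hj : j = nums.length := by omega
    have hrange : PySem.List.pyRange ((j : Int) + 1) ((nums.length : Int) + 1) = [] := by
      rw [List.eq_nil_iff_forall_not_mem]
      intro x hx
      rw [PySem.List.mem_pyRange_one] at hx
      omega
    have hdropn : nums.drop j = [] := by rw [hj]; exact List.drop_length
    rw [hrange, hdropn]
    simp only [pvInnerA, pvGoB, add_zero]
    exact (max_eq_left hres).symm
  | succ d IH =>
    intro i j res cur hd hij hjn hp hcur hres
    by_cases hjn' : j = nums.length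
    · have hj : j = nums.length := hjn'
      have hrange : PySem.List.pyRange ((j : Int) + 1) ((nums.length : Int) + 1) = [] := by
        rw [List.eq_nil_iff_forall_not_mem]
        intro x hx
        rw [PySem.List.mem_pyRange_one] at hx
        omega
      have hdropn : nums.drop j = [] := by rw [hj]; exact List.drop_length
      rw [hrange, hdropn]
      simp only [pvInnerA, pvGoB, add_zero]
      exact (max_eq_left hres).symm
    · have hjlt : j < nums.length := by omega
      have hcons : PySem.List.pyRange ((j : Int) + 1) ((nums.length : Int) + 1)
          = ((j : Int) + 1) :: PySem.List.pyRange ((j : Int) + 1 + 1) ((nums.length : Int) + 1) :=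
        PySem.List.pyRange_one_cons (by omega)
      rw [hcons]
      have hslice : PySem.List.slice nums (some (i : Int)) (some ((j : Int) + 1))
          = (nums.drop i).take (j + 1 - i) := by
        have : ((j : Int) + 1) = ((j + 1 : Nat) : Int) := by push_cast; ring
        rw [this, PySem.List.slice_natCast]
      have hlen : j - i < (nums.drop i).length := by
        rw [List.length_drop]; omega
      have htake : (nums.drop i).take (j + 1 - i)
          = (nums.drop i).take (j - i) ++ [nums[j]'hjlt] := by
        have h1 : j + 1 - i = (j - i) + 1 := by omega
        have h2 : i + (j - i) = j := by omega
        rw [h1, List.take_add_one, List.getElem?_eq_getElem hlen]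
        simp only [Option.toList_some, List.getElem_drop, h2]
      have hchk : pvCheck (PySem.List.slice nums (some (i : Int)) (some ((j : Int) + 1))) = true
          ↔ PySem.Int.band cur (nums[j]'hjlt) = 0 := by
        rw [pvCheck_iff, hslice, htake, List.pairwise_append]
        simp only [List.pairwise_singleton, List.mem_singleton, true_and]
        constructor
        · rintro ⟨_, h⟩
          exact (hcur _).mpr (fun y hy => h y hy _ rfl)
        · intro hx
          exact ⟨hp, fun y hy z hz => hz ▸ (hcur _).mp hx y hy⟩
      have hdrop : nums.drop j = nums[j]'hjlt :: nums.drop (j + 1) := List.drop_eq_getElem_cons hjlt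
      by_cases hx : PySem.Int.band cur (nums[j]'hjlt) = 0
      · -- extend the window
        rw [pvInnerA]
        rw [if_pos (hchk.mpr hx)]
        have hklen : ((PySem.List.slice nums (some (i : Int)) (some ((j : Int) + 1))).length : Int)
            = (j : Int) + 1 - (i : Int) := by
          rw [hslice, List.length_take, List.length_drop]
          have : min (j + 1 - i) (nums.length - i) = j + 1 - i := by omega
          rw [this, Nat.cast_sub (by omega)]
          push_cast; ring
        rw [hklen]
        have hIH := IH i (j + 1) (max res ((j : Int) + 1 - (i : Int))) (PySem.Int.bor cur (nums[j]'hjlt))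
          (by omega) (by omega) (by omega)
          (by
            rw [htake, List.pairwise_append]
            exact ⟨hp, List.pairwise_singleton _ _, fun a ha b hb => by
              simp only [List.mem_singleton] at hb
              exact hb ▸ (hcur _).mp hx a ha⟩)
          (by
            intro z
            rw [pvBand_bor_zero_iff, hcur z, htake, List.forall_mem_append, List.forall_mem_singleton])
          (le_max_right _ _)
        have hcast : ((j + 1 : Nat) : Int) = (j : Int) + 1 := by push_cast; ring
        rw [hcast] at hIH
        rw [hIH]
        -- arithmetic on maxes
        have hg := pvGoB_nonneg (nums.drop (j + 1)) (PySem.Int.bor cur (nums[j]'hjlt)) 0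
        rw [hdrop, pvGoB, if_neg (by simp [hx])]
        rw [pvGoB_shift _ _ (0 + 1)]
        rw [max_assoc]
        have h2 : max ((j : Int) + 1 - (i : Int))
            ((j : Int) + 1 - (i : Int) + pvGoB (PySem.Int.bor cur (nums[j]'hjlt)) 0 (nums.drop (j + 1)))
            = (j : Int) + 1 - (i : Int) + pvGoB (PySem.Int.bor cur (nums[j]'hjlt)) 0 (nums.drop (j + 1)) :=
          max_eq_right (by omega)
        rw [h2]
        congr 1
        ring
      · -- break
        rw [pvInnerA]
        rw [if_neg (by rw [hchk]; exact hx)]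
        rw [hdrop, pvGoB, if_pos (by simpa using hx)]
        rw [add_zero]
        exact (max_eq_left hres).symm

theorem pvWhileB_eq (nums : List Int) :
    ∀ (d j : Nat) (cur : Int), nums.length ≤ j + d →
      pvWhileB nums d cur (j : Int) = (j : Int) + pvGoB cur 0 (nums.drop j) := by
  intro d
  induction d with
  | zero =>
    intro j cur hd
    have hdropn : nums.drop j = [] := List.drop_eq_nil_of_le hd
    rw [hdropn]
    simp [pvWhileB, pvGoB]
  | succ d IH =>
    intro j cur hd
    by_cases hj : j < nums.length
    · have hget : PySem.List.pyGetD nums (j : Int) 0 = nums[j]'hj := by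
        rw [PySem.List.pyGetD_natCast, List.getD_eq_getElem nums 0 hj]
      have hdrop : nums.drop j = nums[j]'hj :: nums.drop (j + 1) := List.drop_eq_getElem_cons hj
      rw [pvWhileB, hget, hdrop]
      by_cases hx : PySem.Int.band cur (nums[j]'hj) = 0
      · rw [if_pos ⟨by exact_mod_cast hj, hx⟩]
        have hcast : ((j : Int) + 1) = ((j + 1 : Nat) : Int) := by push_cast; ring
        rw [hcast, IH (j + 1) _ (by omega)]
        rw [pvGoB, if_neg (by simp [hx]), pvGoB_shift _ _ (0 + 1)]
        push_cast
        ring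
      · rw [if_neg (by intro h; exact hx h.2)]
        rw [pvGoB, if_pos (by simpa using hx)]
        ring
    · have hdropn : nums.drop j = [] := List.drop_eq_nil_of_le (by omega)
      rw [pvWhileB, if_neg (by intro h; exact absurd h.1 (by exact_mod_cast (by omega : ¬ j < nums.length)))]
      rw [hdropn]
      simp [pvGoB]

theorem pvOuter_eq (nums : List Int) :
    ∀ (is : List Int) (res : Int),
      (∀ i ∈ is, ∃ m : Nat, i = (m : Int) ∧ m ≤ nums.length) → 0 ≤ res →
      pvOuterA nums res is = pvOuterB nums res is := by
  intro is
  induction is with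
  | nil => intro res _ _; rfl
  | cons i is ih =>
    intro res hmem hres
    obtain ⟨m, rfl, hm⟩ := hmem i List.mem_cons_self
    rw [pvOuterA, pvOuterB]
    have hinner := pvInnerA_eq nums nums.length m m res 0 (by omega) (le_refl m) hm
      (by simp)
      (by intro x; simp [pvBand_zero_left])
      (by omega)
    rw [hinner]
    rw [pvWhileB_eq nums nums.length m 0 (by omega)]
    have hzero : max res ((m : Int) - (m : Int) + pvGoB 0 0 (nums.drop m))
        = max res ((m : Int) + pvGoB 0 0 (nums.drop m) - (m : Int)) := by
      congr 1; ring
    rw [hzero]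
    exact ih _ (fun i hi => hmem i (List.mem_cons_of_mem _ hi)) (le_trans hres (le_max_left _ _))

-- ===== VERDICT (by name: the statement is the Claim_ definition above) =====
theorem longestNiceSubarray_spec : Claim_equal_longestNiceSubarray := by
  intro nums _
  unfold Spec_longestNiceSubarray longestNiceSubarray longestNiceSubarray_alt
  apply pvOuter_eq
  · intro i hi
    rw [PySem.List.mem_pyRange_one] at hi
    exact ⟨i.toNat, by omega, by omega⟩
  · norm_num
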